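-- pv_equiv track=rewrite | github.com/harshithakotari/python1 | week3.py | solution9
-- ===== SOURCE A (Python) =====
-- def solution9(reports):
--     max_score = float('-inf')
--     student_name = ""
--     for name, score in reports.items():
--         if score > max_score:
--             max_score = score
--             student_name = name
--     return student_name
-- ===== SOURCE B (Python) =====
-- def solution9(reports):
--     if not reports:
--         return ""
--     return sorted(reports.items(), key=lambda kv: kv[1], reverse=True)[0][0]
-- ===== Notes on version B (the rewrite author's own statement) =====
-- stated objective: alternative
-- what changed: B replaces the running-max scan with sort-then-take-first: it reverse-sorts the items by score with Python's stable sort (so equal-score keys keep dict order) and returns the first key, guarding the empty dict with "".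
import Mathlib
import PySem

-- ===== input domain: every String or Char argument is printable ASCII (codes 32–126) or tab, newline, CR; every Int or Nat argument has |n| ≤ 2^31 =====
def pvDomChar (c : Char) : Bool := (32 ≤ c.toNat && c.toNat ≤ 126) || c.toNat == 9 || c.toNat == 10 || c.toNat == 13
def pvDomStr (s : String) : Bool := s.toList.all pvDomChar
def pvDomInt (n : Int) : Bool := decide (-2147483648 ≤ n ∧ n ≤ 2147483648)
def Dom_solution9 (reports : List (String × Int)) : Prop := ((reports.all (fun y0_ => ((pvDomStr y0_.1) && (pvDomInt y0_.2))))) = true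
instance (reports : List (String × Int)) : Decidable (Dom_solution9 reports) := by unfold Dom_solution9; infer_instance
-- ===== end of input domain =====

-- B re-implements the running-max scan as a stable reverse sort by score followed by taking the
-- first key (objective: alternative decomposition; same result by sort stability).

-- ===== PORT A =====
-- float('-inf') as initial max is modelled by Option Int: 'none' compares below every score,
-- so the first iteration always updates — exactly Python's 'score > -inf'.
def solution9 (reports : List (String × Int)) : String :=
  (reports.foldl
    (fun (st : Option Int × String) nv =>
      match st.1 with
      | none => (some nv.2, nv.1)
      | some m => if m < nv.2 then (some nv.2, nv.1) else st)
    (none, "")).2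

-- ===== PORT B =====
def solution9_alt (reports : List (String × Int)) : String :=
  match PySem.List.sorted reports (fun kv => kv.2) true with
  | [] => ""
  | m :: _ => m.1

-- ===== PRECONDITION & SPEC =====
def Spec_solution9 (reports : List (String × Int)) (out : String) : Prop := out = solution9_alt reports
instance (reports : List (String × Int)) (out : String) : Decidable (Spec_solution9 reports out) := by unfold Spec_solution9; infer_instance

-- ===== CLAIM (what is proved, stated in full; the proofs are below) =====
def Claim_equal_solution9 : Prop := ∀ (reports : List (String × Int)), Dom_solution9 reports → Spec_solution9 reports (solution9 reports)

-- ===== LEMMAS AND PROOFS =====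

-- Invariant: A's loop state mirrors the head of B's partially built reverse-sorted list.
lemma solution9_loop_inv :
    ∀ (xs acc : List (String × Int)) (ms : Option Int) (nm : String),
      ((acc = [] ∧ ms = none ∧ nm = "") ∨ (∃ h t, acc = h :: t ∧ ms = some h.2 ∧ nm = h.1)) →
      (xs.foldl
        (fun (st : Option Int × String) nv =>
          match st.1 with
          | none => (some nv.2, nv.1)
          | some m => if m < nv.2 then (some nv.2, nv.1) else st)
        (ms, nm)).2
      = (match xs.foldl
            (fun acc x => PySem.List.insertBy (fun a b => decide (b.2 < a.2)) x acc) acc with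
         | [] => ""
         | h :: _ => h.1) := by
  intro xs
  induction xs with
  | nil =>
    intro acc ms nm hinv
    rcases hinv with ⟨ha, _, hn⟩ | ⟨h, t, ha, _, hn⟩ <;> simp [ha, hn]
  | cons x xs ih =>
    intro acc ms nm hinv
    rcases hinv with ⟨ha, hm, hn⟩ | ⟨h, t, ha, hm, hn⟩
    · subst ha; subst hm; subst hn
      simpa [PySem.List.insertBy] using
        ih [x] (some x.2) x.1 (Or.inr ⟨x, [], rfl, rfl, rfl⟩)
    · subst ha; subst hm; subst hn
      by_cases hlt : h.2 < x.2
      · simpa [PySem.List.insertBy, hlt] using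
          ih (x :: h :: t) (some x.2) x.1 (Or.inr ⟨x, h :: t, rfl, rfl, rfl⟩)
      · simpa [PySem.List.insertBy, hlt] using
          ih (h :: PySem.List.insertBy (fun a b => decide (b.2 < a.2)) x t) (some h.2) h.1
            (Or.inr ⟨h, _, rfl, rfl, rfl⟩)

-- ===== VERDICT (by name: the statement is the Claim_ definition above) =====
theorem solution9_spec : Claim_equal_solution9 := by
  intro reports _
  unfold Spec_solution9 solution9 solution9_alt
  rw [PySem.List.sorted_rev_eq_foldl_insertBy]
  exact solution9_loop_inv reports [] none "" (Or.inl ⟨rfl, rfl, rfl⟩)
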